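-- pv_equiv track=rewrite | github.com/projeto-de-algoritmos-2025/Greed_Algorithms | hard/2412. minimum-money-required-before-transactions.py | minimumMoney
-- ===== SOURCE A (Python) =====
-- from typing import List
--
-- def minimumMoney(transactions: List[List[int]]) -> int:
--     # total_loss: acumula a soma das perdas com custo > cashback
--     total_loss = 0
--     # max_cashback_loss: rastreia maior perda com transações custo > cashback
--     max_cashback_loss = 0
--     # max_cost_gain: rastreia maior perda com transaçoes cashback > custo
--     max_cost_gain = 0
--
--     for cost, cashback in transactions:
--         if cost > cashback:
--             # perda total
--             total_loss += cost - cashback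
--             # atualiza o maior cashback encontrado nas transações com perda de dinheiro
--             if cashback > max_cashback_loss:
--                 max_cashback_loss = cashback
--         else:
--             if cost > max_cost_gain:
--                 max_cost_gain = cost
--     # calculo:
--     # 1. perda total acumulada das transações com perda (total_loss)
--     # 2. o maior valor entre:
--     #    - maior cashback das transações (max_cashback_loss)
--     #    - Mmior custo das transações (max_cost_gain)
--     return total_loss + max(max_cashback_loss, max_cost_gain)
-- ===== SOURCE B (Python) =====
-- from typing import List
--
-- def minimumMoney(transactions: List[List[int]]) -> int:
--     # Divide-and-conquer: each transaction maps to the pair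
--     # (guaranteed loss = max(cost - cashback, 0), candidate peak = min(cost, cashback));
--     # pairs combine associatively by (sum, max), so we fold them over a recursion tree.
--     if not transactions:
--         return 0
--
--     def solve(lo, hi):
--         if hi - lo <= 1:
--             cost, cashback = transactions[lo]
--             return (max(cost - cashback, 0), min(cost, cashback))
--         mid = (lo + hi) // 2
--         l1, b1 = solve(lo, mid)
--         l2, b2 = solve(mid, hi)
--         return (l1 + l2, max(b1, b2))
--
--     loss, best = solve(0, len(transactions))
--     return loss + max(best, 0)
-- ===== Notes on version B (the rewrite author's own statement) =====
-- stated objective: alternative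
-- what changed: Replaces A's single branching scan with three accumulators by a divide-and-conquer monoid fold: each transaction becomes a pair (max(cost-cashback,0), min(cost,cashback)), pairs are merged over a recursion tree by (sum, max), and the answer is loss + max(best, 0).
import Mathlib
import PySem

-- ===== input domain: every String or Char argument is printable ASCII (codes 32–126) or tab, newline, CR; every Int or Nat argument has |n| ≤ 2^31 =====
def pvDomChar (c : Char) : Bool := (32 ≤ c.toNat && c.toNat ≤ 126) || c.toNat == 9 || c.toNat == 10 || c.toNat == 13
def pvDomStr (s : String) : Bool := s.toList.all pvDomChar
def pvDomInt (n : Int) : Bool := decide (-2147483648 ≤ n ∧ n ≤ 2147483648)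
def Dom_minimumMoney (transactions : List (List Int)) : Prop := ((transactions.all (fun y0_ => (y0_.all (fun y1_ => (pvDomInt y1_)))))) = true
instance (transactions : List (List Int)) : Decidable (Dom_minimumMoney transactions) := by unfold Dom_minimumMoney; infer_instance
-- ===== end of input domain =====

-- B replaces A's single branching scan (three accumulators) by a divide-and-conquer
-- fold of per-transaction pairs (max(cost-cashback,0), min(cost,cashback)) merged by (sum, max).


-- ===== PORT A =====
-- 'for cost, cashback in transactions' unpacks a 2-element row (ValueError otherwise;
-- such rows are excluded by Pre_); the two components:
def pvCost (t : List Int) : Int := t.headD 0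
def pvCashback (t : List Int) : Int := (t.drop 1).headD 0

def minimumMoney (transactions : List (List Int)) : Int :=
  let st := transactions.foldl (fun (s : Int × Int × Int) t =>
    let cost := pvCost t
    let cashback := pvCashback t
    if cost > cashback then
      (s.1 + (cost - cashback),
       (if cashback > s.2.1 then cashback else s.2.1),
       s.2.2)
    else
      (s.1, s.2.1, (if cost > s.2.2 then cost else s.2.2))) (0, 0, 0)
  st.1 + max st.2.1 st.2.2

-- ===== PORT B =====
-- transactions[lo] (only reached with 0 ≤ lo < len, so plain access is exact there):
def pvGet (transactions : List (List Int)) (lo : Nat) : List Int :=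
  (transactions.drop lo).headD []

-- the inner 'def solve(lo, hi)'; indices stay ≥ 0 in Python, so Nat is exact here
def pvSolve (transactions : List (List Int)) (lo hi : Nat) : Int × Int :=
  if hi - lo ≤ 1 then
    let t := pvGet transactions lo
    (max (pvCost t - pvCashback t) 0, min (pvCost t) (pvCashback t))
  else
    let mid := (lo + hi) / 2
    let a := pvSolve transactions lo mid
    let b := pvSolve transactions mid hi
    (a.1 + b.1, max a.2 b.2)
termination_by hi - lo
decreasing_by all_goals omega

def minimumMoney_alt (transactions : List (List Int)) : Int :=
  if transactions.isEmpty then 0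
  else
    let r := pvSolve transactions 0 transactions.length
    r.1 + max r.2 0

-- ===== PRECONDITION & SPEC =====
-- Pre_ excludes rows that are not 2-element lists: on those Python A's tuple unpacking raises ValueError.
def Pre_minimumMoney (transactions : List (List Int)) : Prop :=
  ∀ t ∈ transactions, t.length = 2
instance (transactions : List (List Int)) : Decidable (Pre_minimumMoney transactions) := by unfold Pre_minimumMoney; infer_instance
def pvWitness_minimumMoney : List (List Int) := [[3, 1], [2, 5]]

def Spec_minimumMoney (transactions : List (List Int)) (out : Int) : Prop := out = minimumMoney_alt transactions
instance (transactions : List (List Int)) (out : Int) : Decidable (Spec_minimumMoney transactions out) := by unfold Spec_minimumMoney; infer_instance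

-- ===== CLAIM (what is proved, stated in full; the proofs are below) =====
def Claim_equal_minimumMoney : Prop := ∀ (transactions : List (List Int)), Dom_minimumMoney transactions → Pre_minimumMoney transactions → Spec_minimumMoney transactions (minimumMoney transactions)

-- ===== LEMMAS AND PROOFS =====

-- per-row quantities
def pvLf (t : List Int) : Int := max (pvCost t - pvCashback t) 0
def pvMn (t : List Int) : Int := min (pvCost t) (pvCashback t)

-- running loss sum (A's shape) and running max of mins
def pvLoss (ts : List (List Int)) (a : Int) : Int :=
  ts.foldl (fun acc t =>
    if pvCost t > pvCashback t then acc + (pvCost t - pvCashback t) else acc) a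

def pvHMax (ts : List (List Int)) (k : Int) : Int :=
  ts.foldl (fun m t => max m (pvMn t)) k

-- total loss as a plain sum
def pvAggL (ts : List (List Int)) : Int := (ts.map pvLf).sum

-- value of pvSolve on a nonempty slice
def pvFNE (s : List (List Int)) : Int × Int :=
  (pvAggL s, pvHMax (s.drop 1) (pvMn (s.headD [])))

lemma foldA_eq : ∀ (ts : List (List Int)) (L m1 m2 : Int),
    (let st := ts.foldl (fun (s : Int × Int × Int) t =>
      let cost := pvCost t
      let cashback := pvCashback t
      if cost > cashback then
        (s.1 + (cost - cashback),
         (if cashback > s.2.1 then cashback else s.2.1),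
         s.2.2)
      else
        (s.1, s.2.1, (if cost > s.2.2 then cost else s.2.2))) (L, m1, m2)
     st.1 + max st.2.1 st.2.2)
    = pvLoss ts L + pvHMax ts (max m1 m2) := by
  intro ts
  induction ts with
  | nil => intro L m1 m2; simp [pvLoss, pvHMax]
  | cons t ts ih =>
    intro L m1 m2
    by_cases h : pvCost t > pvCashback t
    · have hacc : max (if pvCashback t > m1 then pvCashback t else m1) m2
          = max (max m1 m2) (pvMn t) := by
        simp only [pvMn]; split_ifs <;> omega
      simpa [pvLoss, pvHMax, h, hacc] using ih (L + (pvCost t - pvCashback t)) (if pvCashback t > m1 then pvCashback t else m1) m2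
    · have hacc : max m1 (if pvCost t > m2 then pvCost t else m2)
          = max (max m1 m2) (pvMn t) := by
        simp only [pvMn]; split_ifs <;> omega
      simpa [pvLoss, pvHMax, h, hacc] using ih L m1 (if pvCost t > m2 then pvCost t else m2)

lemma loss_eq_aggL : ∀ (ts : List (List Int)) (a : Int), pvLoss ts a = a + pvAggL ts := by
  intro ts
  induction ts with
  | nil => intro a; simp [pvLoss, pvAggL]
  | cons t ts ih =>
    intro a
    have hstep : (if pvCost t > pvCashback t then a + (pvCost t - pvCashback t) else a)
        = a + pvLf t := by simp only [pvLf]; split_ifs <;> omega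
    simp only [pvLoss, List.foldl_cons, pvAggL, List.map_cons, List.sum_cons] at *
    rw [hstep, ih]; ring

lemma hmax_max : ∀ (ts : List (List Int)) (a b : Int),
    pvHMax ts (max a b) = max a (pvHMax ts b) := by
  intro ts
  induction ts with
  | nil => intro a b; simp [pvHMax]
  | cons t ts ih =>
    intro a b
    have : max (max a b) (pvMn t) = max a (max b (pvMn t)) := by omega
    simp only [pvHMax, List.foldl_cons] at *
    rw [this, ih]

lemma fne_append (x y : List (List Int)) (hx : x ≠ []) (hy : y ≠ []) :
    pvFNE (x ++ y) = ((pvFNE x).1 + (pvFNE y).1, max (pvFNE x).2 (pvFNE y).2) := by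
  obtain ⟨hx0, tx, rfl⟩ := List.exists_cons_of_ne_nil hx
  obtain ⟨hy0, ty, rfl⟩ := List.exists_cons_of_ne_nil hy
  simp only [pvFNE, pvAggL, List.map_append, List.sum_append, List.cons_append,
    List.drop_succ_cons, List.headD_cons, List.map_cons, List.sum_cons, Prod.mk.injEq]
  refine ⟨by ring, ?_⟩
  simp only [List.drop_zero]
  have h1 : pvHMax (tx ++ hy0 :: ty) (pvMn hx0)
      = pvHMax (hy0 :: ty) (pvHMax tx (pvMn hx0)) := by
    simp [pvHMax, List.foldl_append]
  rw [h1]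
  show pvHMax ty (max (pvHMax tx (pvMn hx0)) (pvMn hy0))
      = max (pvHMax tx (pvMn hx0)) (pvHMax ty (pvMn hy0))
  exact hmax_max ty _ _

lemma solve_eq (ts : List (List Int)) : ∀ (n lo hi : Nat), hi - lo = n → lo < hi → hi ≤ ts.length →
    pvSolve ts lo hi = pvFNE ((ts.drop lo).take (hi - lo)) := by
  intro n
  induction n using Nat.strong_induction_on with
  | _ n ih =>
    intro lo hi hn hlt hle
    by_cases hbase : hi - lo ≤ 1
    · have h1 : hi - lo = 1 := by omega
      rw [pvSolve, if_pos hbase]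
      have hlen : lo < ts.length := by omega
      obtain ⟨t, rest, hdrop⟩ : ∃ t rest, ts.drop lo = t :: rest := by
        cases hd : ts.drop lo with
        | nil => exfalso; have := List.drop_eq_nil_iff.mp hd; omega
        | cons a b => exact ⟨a, b, rfl⟩
      simp [h1, hdrop, pvFNE, pvGet, pvAggL, pvHMax, pvLf, pvMn]
    · rw [pvSolve, if_neg hbase]
      have hmid1 : lo < (lo + hi) / 2 := by omega
      have hmid2 : (lo + hi) / 2 < hi := by omega
      have e1 := ih ((lo + hi) / 2 - lo) (by omega) lo ((lo + hi) / 2) rfl hmid1 (by omega)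
      have e2 := ih (hi - (lo + hi) / 2) (by omega) ((lo + hi) / 2) hi rfl hmid2 hle
      simp only [e1, e2]
      have hsplit : (ts.drop lo).take (hi - lo)
          = (ts.drop lo).take ((lo + hi) / 2 - lo)
            ++ (ts.drop ((lo + hi) / 2)).take (hi - (lo + hi) / 2) := by
        have hdd : ts.drop ((lo + hi) / 2) = (ts.drop lo).drop ((lo + hi) / 2 - lo) := by
          rw [List.drop_drop]; congr 1; omega
        rw [hdd, ← List.take_add]
        congr 1; omega
      rw [hsplit, fne_append]
      · have hlen1 : lo < ts.length := by omega
        apply List.ne_nil_of_length_pos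
        simp only [List.length_take, List.length_drop]
        omega
      · have hlen2 : (lo + hi) / 2 < ts.length := by omega
        apply List.ne_nil_of_length_pos
        simp only [List.length_take, List.length_drop]
        omega

-- ===== VERDICT (by name: the statement is the Claim_ definition above) =====
theorem minimumMoney_spec : Claim_equal_minimumMoney := by
  intro ts _ _
  show minimumMoney ts = minimumMoney_alt ts
  cases ts with
  | nil => simp [minimumMoney, minimumMoney_alt]
  | cons t rest =>
    have hA := foldA_eq (t :: rest) 0 0 0
    simp only [minimumMoney, minimumMoney_alt, List.isEmpty_cons]
    rw [hA]
    have hS := solve_eq (t :: rest) ((t :: rest).length) 0 ((t :: rest).length) rfl (by simp) le_rfl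
    simp only [List.drop_zero, List.take_length, Nat.sub_zero] at hS
    rw [hS]
    have h2 : pvHMax (t :: rest) (max 0 0) = max (pvHMax rest (pvMn t)) 0 := by
      have : (max (0:Int) 0) = 0 := by omega
      rw [this]
      show pvHMax rest (max 0 (pvMn t)) = max (pvHMax rest (pvMn t)) 0
      rw [hmax_max rest 0 (pvMn t)]; omega
    rw [h2, loss_eq_aggL]
    simp [pvFNE]
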